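-- pv_equiv track=rewrite | github.com/Swingft/String_Encryption | EncryptReplaceLiterals.py | transform_chunks
-- ===== SOURCE A (Python) =====
-- def transform_chunks(chunks: list[str]) -> list[dict]:
--     transformed = []
--     for i, chunk in enumerate(chunks):
--         if i == 0:
--             transformed.append({"method": "reverse", "data": chunk[::-1]})
--         elif i == 1:
--             xorred = ''.join(chr(ord(c) ^ 0x3A) for c in chunk)
--             transformed.append({"method": "xor", "data": xorred})
--         elif i == 2:
--             rotated = chunk[1:] + chunk[0]
--             transformed.append({"method": "rotate", "data": rotated})
--         else:
--             transformed.append({"method": "plain", "data": chunk})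
--     return transformed
-- ===== SOURCE B (Python) =====
-- def transform_chunks(chunks: list[str]) -> list[dict]:
--     table = [
--         ("reverse", lambda s: s[::-1]),
--         ("xor", lambda s: ''.join(chr(ord(c) ^ 0x3A) for c in s)),
--         ("rotate", lambda s: s[1:] + s[0]),
--     ]
--
--     def go(fns, cs):
--         if not cs:
--             return []
--         if not fns:
--             return [{"method": "plain", "data": c} for c in cs]
--         name, f = fns[0]
--         return [{"method": name, "data": f(cs[0])}] + go(fns[1:], cs[1:])
--
--     return go(table, chunks)
-- ===== Notes on version B (the rewrite author's own statement) =====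
-- stated objective: alternative
-- what changed: Replaces the indexed enumerate/if-elif loop by a dispatch table of (method, transform) pairs consumed by a recursion that walks the table and the chunk list in lockstep, emitting 'plain' entries once the table is exhausted; no index arithmetic or branching on position remains.
import Mathlib
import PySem

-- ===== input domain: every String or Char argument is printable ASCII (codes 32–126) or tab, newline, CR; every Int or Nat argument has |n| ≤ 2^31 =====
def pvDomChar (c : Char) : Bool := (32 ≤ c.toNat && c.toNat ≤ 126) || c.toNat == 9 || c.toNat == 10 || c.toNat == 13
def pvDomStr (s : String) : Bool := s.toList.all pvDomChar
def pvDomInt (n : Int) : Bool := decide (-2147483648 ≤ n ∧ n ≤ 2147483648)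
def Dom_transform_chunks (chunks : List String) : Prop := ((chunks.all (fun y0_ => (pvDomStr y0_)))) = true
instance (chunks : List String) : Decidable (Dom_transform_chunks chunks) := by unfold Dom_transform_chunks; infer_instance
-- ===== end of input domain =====

-- B replaces A's indexed if-elif loop by a dispatch table of (method, transform) pairs
-- consumed in lockstep with the chunk list by a recursion (objective: alternative).

-- ===== PORT A =====
-- the loop body of A: the if-elif chain on (i, chunk); dicts become association lists in
-- insertion order; chunk[0] at i == 2 is PySem.Str.pyGet? (none = IndexError, excluded by
-- Pre_; that branch has no Python value, the port skips the entry there)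
def pvBodyA (transformed : List (List (String × String))) (p : Int × String) :
    List (List (String × String)) :=
  if p.1 == 0 then
    transformed ++ [[("method", "reverse"), ("data", String.ofList p.2.toList.reverse)]]
  else if p.1 == 1 then
    transformed ++ [[("method", "xor"),
      ("data", String.ofList (p.2.toList.map (fun c => Char.ofNat (c.toNat ^^^ 58))))]]
  else if p.1 == 2 then
    match PySem.Str.pyGet? p.2 0 with
    | some c0 =>
      transformed ++ [[("method", "rotate"),
        ("data", String.ofList (p.2.toList.drop 1 ++ [c0]))]]
    | none => transformed
  else
    transformed ++ [[("method", "plain"), ("data", p.2)]]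

-- single loop over enumerate(chunks)
def transform_chunks (chunks : List String) : List (List (String × String)) :=
  (PySem.List.enumerate chunks 0).foldl pvBodyA []

-- ===== PORT B =====
-- Source B's three table transforms; s[0] in the rotate lambda is pyGet? (none = IndexError,
-- excluded by Pre_; the port returns "" there)
def pvRevF (s : String) : String := String.ofList s.toList.reverse
def pvXorF (s : String) : String :=
  String.ofList (s.toList.map (fun c => Char.ofNat (c.toNat ^^^ 58)))
def pvRotF (s : String) : String :=
  match PySem.Str.pyGet? s 0 with
  | some c0 => String.ofList (s.toList.drop 1 ++ [c0])
  | none => ""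

-- Source B's dispatch table
def pvTable : List (String × (String → String)) :=
  [("reverse", pvRevF), ("xor", pvXorF), ("rotate", pvRotF)]

-- Source B's go: consume the table and the chunks in lockstep
def pvGo : List (String × (String → String)) → List String → List (List (String × String))
  | _, [] => []
  | [], cs => cs.map (fun c => [("method", "plain"), ("data", c)])
  | (name, f) :: fr, c :: cr => [("method", name), ("data", f c)] :: pvGo fr cr

def transform_chunks_alt (chunks : List String) : List (List (String × String)) :=
  pvGo pvTable chunks

-- ===== PRECONDITION & SPEC =====
-- Pre_ excludes exactly the inputs where Python A raises IndexError: a third chunk that is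
-- the empty string (chunk[0] on "" at index 2); B raises there too.
def Pre_transform_chunks (chunks : List String) : Prop := chunks.getD 2 " " ≠ ""
instance (chunks : List String) : Decidable (Pre_transform_chunks chunks) := by
  unfold Pre_transform_chunks; infer_instance

def pvWitness_transform_chunks : List String := ["ab", "cd", "ef", "gh"]

def Spec_transform_chunks (chunks : List String) (out : List (List (String × String))) : Prop := out = transform_chunks_alt chunks
instance (chunks : List String) (out : List (List (String × String))) : Decidable (Spec_transform_chunks chunks out) := by unfold Spec_transform_chunks; infer_instance

-- ===== CLAIM (what is proved, stated in full; the proofs are below) =====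
def Claim_equal_transform_chunks : Prop := ∀ (chunks : List String), Dom_transform_chunks chunks → Pre_transform_chunks chunks → Spec_transform_chunks chunks (transform_chunks chunks)

-- ===== LEMMAS AND PROOFS =====

-- past index 2, A's loop appends exactly the 'plain' entries
theorem pvTailLoop (rest : List String) :
    ∀ (s : Int) (acc : List (List (String × String))), 3 ≤ s →
      (PySem.List.enumerate rest s).foldl pvBodyA acc
        = acc ++ rest.map (fun ch => [("method", "plain"), ("data", ch)]) := by
  induction rest with
  | nil => intro s acc _; simp [PySem.List.enumerate_nil]
  | cons x xs ih =>
    intro s acc hs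
    rw [PySem.List.enumerate_cons, List.foldl_cons]
    have h0 : ((s, x).1 == (0 : Int)) = false := by simp; omega
    have h1 : ((s, x).1 == (1 : Int)) = false := by simp; omega
    have h2 : ((s, x).1 == (2 : Int)) = false := by simp; omega
    rw [show pvBodyA acc (s, x) = acc ++ [[("method", "plain"), ("data", x)]] by
      simp [pvBodyA, h0, h1, h2]]
    rw [ih (s + 1) _ (by omega)]
    simp

-- once the table is exhausted, B's go emits exactly the 'plain' entries
theorem pvGoNil (cs : List String) :
    pvGo [] cs = cs.map (fun c => [("method", "plain"), ("data", c)]) := by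
  cases cs <;> rfl

-- nonempty third chunk gives a real first character
theorem pvGet0 (s : String) (h : s ≠ "") :
    ∃ c0 cs, s.toList = c0 :: cs ∧ PySem.Str.pyGet? s 0 = some c0 := by
  cases hs : s.toList with
  | nil => exact absurd (by cases s; simpa using hs) h
  | cons c0 cs =>
    refine ⟨c0, cs, rfl, ?_⟩
    simp [PySem.Str.pyGet?, hs, PySem.Chars.pyGet?, PySem.List.pyGet?, PySem.List.pyIdx?]

-- ===== VERDICT (by name: the statement is the Claim_ definition above) =====
theorem transform_chunks_spec : Claim_equal_transform_chunks := by
  intro chunks _dom hpre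
  unfold Spec_transform_chunks
  match chunks with
  | [] => rfl
  | [a] => rfl
  | [a, b] => rfl
  | a :: b :: c :: rest =>
    have hc : c ≠ "" := by
      simpa [Pre_transform_chunks] using hpre
    obtain ⟨c0, cs, hcl, hget⟩ := pvGet0 c hc
    show List.foldl pvBodyA [] _ = _
    rw [PySem.List.enumerate_cons, PySem.List.enumerate_cons, PySem.List.enumerate_cons]
    rw [List.foldl_cons, List.foldl_cons, List.foldl_cons]
    rw [show (0 : Int) + 1 = 1 by norm_num, show (1 : Int) + 1 = 2 by norm_num, show (2 : Int) + 1 = 3 by norm_num]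
    rw [pvTailLoop rest 3 _ (by norm_num)]
    simp only [pvBodyA, hget]
    show _ = pvGo pvTable (a :: b :: c :: rest)
    rw [show pvTable = [("reverse", pvRevF), ("xor", pvXorF), ("rotate", pvRotF)] from rfl]
    rw [pvGo, pvGo, pvGo, pvGoNil]
    simp [pvRevF, pvXorF, pvRotF, hcl, PySem.List.pyGet?, PySem.List.pyIdx?]
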